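-- pv_equiv track=rewrite | github.com/developer-hla/elca-bulletin-maker | src/bulletin_maker/ui/api.py | _format_verse_label
-- ===== SOURCE A (Python) =====
-- def _format_verse_label(selected: list[int]) -> str:
--     """Build a compact verse label like 'Verses 1, 3-5' from sorted indices."""
--     if not selected:
--         return ""
--     nums = sorted(selected)
--     ranges: list[str] = []
--     start = end = nums[0]
--     for n in nums[1:]:
--         if n == end + 1:
--             end = n
--         else:
--             ranges.append(str(start) if start == end else f"{start}-{end}")
--             start = end = n
--     ranges.append(str(start) if start == end else f"{start}-{end}")
--     label = ", ".join(ranges)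
--     return f"Verse {label}" if len(nums) == 1 else f"Verses {label}"
-- ===== SOURCE B (Python) =====
-- def _format_verse_label(selected: list) -> str:
--     """Build a compact verse label like 'Verses 1, 3-5' from sorted indices."""
--     if not selected:
--         return ""
--     nums = sorted(selected)
--     # boolean mask: position i starts a new segment (head always does)
--     starts = [True] + [b != a + 1 for a, b in zip(nums, nums[1:])]
--     # a segment's first value sits where the mask is True; its last value sits
--     # just before the next True (or at the end of the list)
--     firsts = [v for v, st in zip(nums, starts) if st]
--     lasts = [v for v, st in zip(nums, starts[1:] + [True]) if st]
--     parts = [str(a) if a == b else f"{a}-{b}" for a, b in zip(firsts, lasts)]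
--     word = "Verse" if len(nums) == 1 else "Verses"
--     return f"{word} {', '.join(parts)}"
-- ===== Notes on version B (the rewrite author's own statement) =====
-- stated objective: alternative
-- what changed: Replaces A's one-pass start/end state machine with staged vectorized passes: a boolean segment-start mask over neighbour pairs (zip nums nums[1:]), two mask-filtered lists of segment first/last values, and a final zip rendering each pair.
import Mathlib
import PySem

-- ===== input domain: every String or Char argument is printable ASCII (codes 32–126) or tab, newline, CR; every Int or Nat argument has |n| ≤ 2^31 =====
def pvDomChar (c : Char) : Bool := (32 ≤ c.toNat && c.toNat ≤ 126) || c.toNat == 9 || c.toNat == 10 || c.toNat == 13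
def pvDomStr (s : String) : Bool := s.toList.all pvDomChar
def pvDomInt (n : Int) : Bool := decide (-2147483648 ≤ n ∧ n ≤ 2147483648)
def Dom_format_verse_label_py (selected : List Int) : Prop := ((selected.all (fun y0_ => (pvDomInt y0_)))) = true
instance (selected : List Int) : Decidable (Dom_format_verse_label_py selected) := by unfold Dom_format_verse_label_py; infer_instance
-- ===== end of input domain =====

-- B replaces A's one-pass start/end state machine with staged passes (segment-start
-- boolean mask over neighbour pairs, mask-filtered firsts/lasts lists, zipped rendering); same result.

-- ===== PORT A =====
-- str(start) if start == end else f"{start}-{end}"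
def fvA_render (s e : Int) : String :=
  if s = e then PySem.Int.toStr s else PySem.Int.toStr s ++ "-" ++ PySem.Int.toStr e

-- the 'for n in nums[1:]' loop with state (start, end, ranges), plus the final append
def fvA_loop : List Int → Int → Int → List String → List String
  | [], s, e, ranges => ranges ++ [fvA_render s e]
  | n :: rest, s, e, ranges =>
    if n = e + 1 then fvA_loop rest s n ranges
    else fvA_loop rest n n (ranges ++ [fvA_render s e])

def format_verse_label_py (selected : List Int) : String :=
  if selected = [] then ""
  else
    match PySem.List.sorted selected (fun x => x) false with
    | [] => ""  -- unreachable: sorted of a nonempty list is nonempty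
    | h :: t =>
      let ranges := fvA_loop t h h []
      let label := PySem.Str.join ", " ranges
      if (h :: t).length = 1 then "Verse " ++ label else "Verses " ++ label

-- ===== PORT B =====
-- [b != a + 1 for a, b in zip(nums, nums[1:])]  (nums[1:] of a list is its tail)
def fvB_flags (nums : List Int) : List Bool :=
  (nums.zip nums.tail).map (fun p => decide (p.2 ≠ p.1 + 1))

-- starts = [True] + flags
def fvB_starts (nums : List Int) : List Bool := true :: fvB_flags nums

-- the shared comprehension shape: [v for v, st in zip(xs, fs) if st]
def fvB_pick (xs : List Int) (fs : List Bool) : List Int :=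
  ((xs.zip fs).filter (fun p => p.2)).map (fun p => p.1)

-- [v for v, st in zip(nums, starts) if st]
def fvB_firsts (nums : List Int) : List Int := fvB_pick nums (fvB_starts nums)

-- [v for v, st in zip(nums, starts[1:] + [True]) if st]
def fvB_lasts (nums : List Int) : List Int :=
  fvB_pick nums ((fvB_starts nums).tail ++ [true])

-- str(a) if a == b else f"{a}-{b}"
def fvB_part (p : Int × Int) : String :=
  if p.1 = p.2 then PySem.Int.toStr p.1 else PySem.Int.toStr p.1 ++ "-" ++ PySem.Int.toStr p.2

def format_verse_label_py_alt (selected : List Int) : String :=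
  if selected = [] then ""
  else
    let nums := PySem.List.sorted selected (fun x => x) false
    let parts := ((fvB_firsts nums).zip (fvB_lasts nums)).map fvB_part
    let word := if nums.length = 1 then "Verse" else "Verses"
    word ++ " " ++ PySem.Str.join ", " parts

-- ===== PRECONDITION & SPEC =====
def Spec_format_verse_label_py (selected : List Int) (out : String) : Prop := out = format_verse_label_py_alt selected
instance (selected : List Int) (out : String) : Decidable (Spec_format_verse_label_py selected out) := by unfold Spec_format_verse_label_py; infer_instance

-- ===== CLAIM (what is proved, stated in full; the proofs are below) =====
def Claim_equal_format_verse_label_py : Prop := ∀ (selected : List Int), Dom_format_verse_label_py selected → Spec_format_verse_label_py selected (format_verse_label_py selected)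

-- ===== LEMMAS AND PROOFS =====

/-- Run decomposition of e :: t: the end value of the run containing e,
    and the (first, last) pairs of the later runs. Reference shape both ports are reduced to. -/
def fvRuns : Int → List Int → Int × List (Int × Int)
  | e, [] => (e, [])
  | e, n :: t =>
    if n = e + 1 then fvRuns n t
    else (e, (n, (fvRuns n t).1) :: (fvRuns n t).2)

theorem fvA_loop_append (t : List Int) : ∀ (s e : Int) (r : List String),
    fvA_loop t s e r = r ++ fvA_loop t s e [] := by
  induction t with
  | nil => intro s e r; simp [fvA_loop]
  | cons n rest ih =>
    intro s e r
    simp only [fvA_loop]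
    split
    · exact ih s n r
    · rw [ih n n (r ++ [fvA_render s e]), ih n n ([] ++ [fvA_render s e])]
      simp

theorem fvA_loop_eq_runs (t : List Int) : ∀ (s e : Int),
    fvA_loop t s e [] =
      fvA_render s (fvRuns e t).1 :: ((fvRuns e t).2).map (fun p => fvA_render p.1 p.2) := by
  induction t with
  | nil => intro s e; simp [fvA_loop, fvRuns]
  | cons n rest ih =>
    intro s e
    simp only [fvA_loop, fvRuns]
    split
    · exact ih s n
    · simp only [List.nil_append]
      rw [fvA_loop_append rest n n [fvA_render s e], ih n n]
      simp

theorem fvB_flags_cons2 (h n : Int) (t : List Int) :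
    fvB_flags (h :: n :: t) = decide (n ≠ h + 1) :: fvB_flags (n :: t) := rfl

theorem fvB_pick_true (x : Int) (xs : List Int) (fs : List Bool) :
    fvB_pick (x :: xs) (true :: fs) = x :: fvB_pick xs fs := by simp [fvB_pick]

theorem fvB_pick_false (x : Int) (xs : List Int) (fs : List Bool) :
    fvB_pick (x :: xs) (false :: fs) = fvB_pick xs fs := by simp [fvB_pick]

theorem fvB_firsts_cons (h : Int) (t : List Int) :
    fvB_firsts (h :: t) = h :: fvB_pick t (fvB_flags (h :: t)) := by
  simp [fvB_firsts, fvB_starts, fvB_pick_true]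

theorem fvB_lasts_eq (h : Int) (t : List Int) :
    fvB_lasts (h :: t) = fvB_pick (h :: t) (fvB_flags (h :: t) ++ [true]) := rfl

theorem fvB_firsts_lasts_eq_runs (t : List Int) : ∀ (h : Int),
    fvB_firsts (h :: t) = h :: ((fvRuns h t).2).map (fun p => p.1) ∧
    fvB_lasts (h :: t) = (fvRuns h t).1 :: ((fvRuns h t).2).map (fun p => p.2) := by
  induction t with
  | nil =>
    intro h
    constructor <;> simp [fvB_firsts, fvB_lasts, fvB_starts, fvB_flags, fvB_pick, fvRuns]
  | cons n t' ih =>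
    intro h
    obtain ⟨ihF, ihL⟩ := ih n
    rw [fvB_firsts_cons] at ihF
    have ihF' : fvB_pick t' (fvB_flags (n :: t')) = ((fvRuns n t').2).map (fun p => p.1) :=
      ((List.cons.injEq _ _ _ _).mp ihF).2
    by_cases hg : n = h + 1
    · subst hg
      have hd : (decide ((h + 1 : Int) ≠ h + 1)) = false := by simp
      have hr : fvRuns h ((h + 1) :: t') = fvRuns (h + 1) t' := by simp [fvRuns]
      constructor
      · rw [fvB_firsts_cons, fvB_flags_cons2, hd, fvB_pick_false, ihF', hr]
      · rw [fvB_lasts_eq, fvB_flags_cons2, hd, List.cons_append, fvB_pick_false,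
          ← fvB_lasts_eq, ihL, hr]
    · have hd : (decide (n ≠ h + 1)) = true := by simp [hg]
      have hr : fvRuns h (n :: t') =
          (h, (n, (fvRuns n t').1) :: (fvRuns n t').2) := by simp [fvRuns, hg]
      constructor
      · rw [fvB_firsts_cons, fvB_flags_cons2, hd, fvB_pick_true, ihF', hr]
        simp
      · rw [fvB_lasts_eq, fvB_flags_cons2, hd, List.cons_append, fvB_pick_true,
          ← fvB_lasts_eq, ihL, hr]
        simp

theorem fvB_parts_eq_runs (h : Int) (t : List Int) :
    ((fvB_firsts (h :: t)).zip (fvB_lasts (h :: t))).map fvB_part =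
      fvA_render h (fvRuns h t).1 :: ((fvRuns h t).2).map (fun p => fvA_render p.1 p.2) := by
  obtain ⟨hF, hL⟩ := fvB_firsts_lasts_eq_runs t h
  rw [hF, hL]
  simp only [List.zip_cons_cons, List.map_cons]
  rw [List.zip_map']
  simp [fvB_part, fvA_render]

theorem fv_verse_space (s : String) : "Verse " ++ s = "Verse" ++ " " ++ s := rfl
theorem fv_verses_space (s : String) : "Verses " ++ s = "Verses" ++ " " ++ s := rfl

-- ===== VERDICT (by name: the statement is the Claim_ definition above) =====
theorem format_verse_label_py_spec : Claim_equal_format_verse_label_py := by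
  intro selected _
  unfold Spec_format_verse_label_py format_verse_label_py format_verse_label_py_alt
  rcases eq_or_ne selected [] with rfl | hne
  · simp
  · rw [if_neg hne, if_neg hne]
    cases hnums : PySem.List.sorted selected (fun x => x) false with
    | nil => exact absurd ((PySem.List.sorted_eq_nil_iff selected (fun x => x) false).mp hnums) hne
    | cons h t =>
      simp only
      rw [fvA_loop_eq_runs t h h, fvB_parts_eq_runs h t]
      split
      · exact fv_verse_space _
      · exact fv_verses_space _
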